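-- pv_equiv track=rewrite | github.com/ad-fletcher/football-play-caller | play_motion.py | _split_defense_by_type
-- ===== SOURCE A (Python) =====
-- def _split_defense_by_type(positions: list[tuple]) -> tuple[list, list, list, list, list]:
--     """Split defense positions into DL, LBs, CBs, SS, FS lists."""
--     dl, lb, cb, ss, fs = [], [], [], [], []
--     for pos in positions:
--         role = pos[2]
--         if role.startswith("DL"):
--             dl.append(pos)
--         elif role.startswith("LB"):
--             lb.append(pos)
--         elif role in ("CB1", "CB2", "NCB") or role.startswith("CB"):
--             cb.append(pos)
--         elif role == "SS":
--             ss.append(pos)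
--         elif role == "FS":
--             fs.append(pos)
--         else:
--             # Extra DBs or other roles — treat as CB
--             cb.append(pos)
--     return dl, lb, cb, ss, fs
-- ===== SOURCE B (Python) =====
-- def _split_defense_by_type(positions: list[tuple]) -> tuple[list, list, list, list, list]:
--     """Split defense positions into DL, LBs, CBs, SS, FS lists (five filtering passes)."""
--     dl = [p for p in positions if p[2].startswith("DL")]
--     lb = [p for p in positions if p[2].startswith("LB")]
--     ss = [p for p in positions if p[2] == "SS"]
--     fs = [p for p in positions if p[2] == "FS"]
--     cb = [p for p in positions
--           if not p[2].startswith("DL") and not p[2].startswith("LB")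
--           and p[2] != "SS" and p[2] != "FS"]
--     return dl, lb, cb, ss, fs
-- ===== Notes on version B (the rewrite author's own statement) =====
-- stated objective: alternative
-- what changed: Replaces the single first-match dispatch loop over five mutable accumulators with five independent filtering passes (one comprehension per bucket), deriving the CB bucket as the complement of the other four conditions.
import Mathlib
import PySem

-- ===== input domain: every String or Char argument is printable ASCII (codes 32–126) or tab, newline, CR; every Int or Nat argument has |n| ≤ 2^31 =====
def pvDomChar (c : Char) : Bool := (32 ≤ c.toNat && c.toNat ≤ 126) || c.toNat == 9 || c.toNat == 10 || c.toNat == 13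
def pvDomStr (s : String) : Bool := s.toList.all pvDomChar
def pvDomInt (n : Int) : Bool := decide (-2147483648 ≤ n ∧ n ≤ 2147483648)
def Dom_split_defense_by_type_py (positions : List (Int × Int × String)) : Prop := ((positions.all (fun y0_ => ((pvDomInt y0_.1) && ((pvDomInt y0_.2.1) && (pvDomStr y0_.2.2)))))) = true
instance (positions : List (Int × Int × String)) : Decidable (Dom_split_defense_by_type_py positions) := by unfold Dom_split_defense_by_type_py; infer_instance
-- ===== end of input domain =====

-- B replaces A's single first-match dispatch loop over five mutable accumulators with five
-- independent filtering passes, one per bucket, CB being the complement of the other four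
-- conditions (objective: alternative; same O(n) cost).

-- ===== PORT A =====
-- the body of A's for-loop: dispatch one position into the five accumulator lists
def sdbtStep (acc : (List (Int × Int × String)) × (List (Int × Int × String)) × (List (Int × Int × String)) × (List (Int × Int × String)) × (List (Int × Int × String))) (pos : Int × Int × String) : (List (Int × Int × String)) × (List (Int × Int × String)) × (List (Int × Int × String)) × (List (Int × Int × String)) × (List (Int × Int × String)) :=
  let (dl, lb, cb, ss, fs) := acc
  let role := pos.2.2
  if PySem.Str.startswith role "DL" then (dl ++ [pos], lb, cb, ss, fs)
  else if PySem.Str.startswith role "LB" then (dl, lb ++ [pos], cb, ss, fs)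
  else if (role == "CB1" || role == "CB2" || role == "NCB") || PySem.Str.startswith role "CB" then (dl, lb, cb ++ [pos], ss, fs)
  else if role == "SS" then (dl, lb, cb, ss ++ [pos], fs)
  else if role == "FS" then (dl, lb, cb, ss, fs ++ [pos])
  else (dl, lb, cb ++ [pos], ss, fs)

-- literal port of A: one fold of the loop body over positions, starting from five empty lists
def split_defense_by_type_py (positions : List (Int × Int × String)) : (List (Int × Int × String)) × (List (Int × Int × String)) × (List (Int × Int × String)) × (List (Int × Int × String)) × (List (Int × Int × String)) :=
  positions.foldl sdbtStep ([], [], [], [], [])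

-- ===== PORT B =====
-- literal port of Source B: five independent filter passes
def split_defense_by_type_py_alt (positions : List (Int × Int × String)) : (List (Int × Int × String)) × (List (Int × Int × String)) × (List (Int × Int × String)) × (List (Int × Int × String)) × (List (Int × Int × String)) :=
  (positions.filter (fun p => PySem.Str.startswith p.2.2 "DL"),
   positions.filter (fun p => PySem.Str.startswith p.2.2 "LB"),
   positions.filter (fun p => !PySem.Str.startswith p.2.2 "DL" && !PySem.Str.startswith p.2.2 "LB" && p.2.2 != "SS" && p.2.2 != "FS"),
   positions.filter (fun p => p.2.2 == "SS"),
   positions.filter (fun p => p.2.2 == "FS"))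

-- ===== PRECONDITION & SPEC =====
def Spec_split_defense_by_type_py (positions : List (Int × Int × String)) (out : (List (Int × Int × String)) × (List (Int × Int × String)) × (List (Int × Int × String)) × (List (Int × Int × String)) × (List (Int × Int × String))) : Prop := out = split_defense_by_type_py_alt positions
-- default instance search exceeds its size limit on the 5-tuple, so the DecidableEq chain is built explicitly
instance (positions : List (Int × Int × String)) (out : (List (Int × Int × String)) × (List (Int × Int × String)) × (List (Int × Int × String)) × (List (Int × Int × String)) × (List (Int × Int × String))) : Decidable (Spec_split_defense_by_type_py positions out) := by
  unfold Spec_split_defense_by_type_py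
  letI h0 : DecidableEq (List (Int × Int × String)) := inferInstance
  letI h1 := @instDecidableEqProd _ _ h0 h0
  letI h2 := @instDecidableEqProd _ _ h0 h1
  letI h3 := @instDecidableEqProd _ _ h0 h2
  letI h4 := @instDecidableEqProd _ _ h0 h3
  exact h4 out (split_defense_by_type_py_alt positions)

-- ===== CLAIM (what is proved, stated in full; the proofs are below) =====
def Claim_equal_split_defense_by_type_py : Prop := ∀ (positions : List (Int × Int × String)), Dom_split_defense_by_type_py positions → Spec_split_defense_by_type_py positions (split_defense_by_type_py positions)

-- ===== LEMMAS AND PROOFS =====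

-- the head of a char list that starts with a given nonempty prefix
theorem head_of_sw (l p : List Char) (a : Char) (h : PySem.Chars.startswith l (a :: p) = true) : l.head? = some a := by
  rcases (PySem.Chars.startswith_iff _ _).mp h with ⟨t, ht⟩
  rw [← ht]; rfl

-- a string whose first char is a cannot equal a literal starting with a different char
theorem sw_ne_lit (r : String) (a : Char) (hh : r.toList.head? = some a) (lit : String) (hl : lit.toList.head? ≠ some a) : (r == lit) = false := by
  apply beq_eq_false_iff_ne.mpr
  intro he; apply hl; rw [← he]; exact hh

-- a string whose first char is a does not start with a prefix whose first char is b ≠ a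
theorem sw_sw_false (r : String) (a b : Char) (hh : r.toList.head? = some a) (hne : b ≠ a) (p : List Char) : PySem.Chars.startswith r.toList (b :: p) = false := by
  cases hsw : PySem.Chars.startswith r.toList (b :: p) with
  | false => rfl
  | true =>
    have hb := head_of_sw _ _ _ hsw
    rw [hh] at hb
    exact absurd (Option.some.inj hb).symm hne

-- loop invariant: folding A's step over xs appends each of B's five filters to its accumulator
theorem main_lemma (xs : List (Int × Int × String)) (d l c s f : List (Int × Int × String)) :
    xs.foldl sdbtStep (d, l, c, s, f)
    = (d ++ xs.filter (fun p => PySem.Str.startswith p.2.2 "DL"),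
       l ++ xs.filter (fun p => PySem.Str.startswith p.2.2 "LB"),
       c ++ xs.filter (fun p => !PySem.Str.startswith p.2.2 "DL" && !PySem.Str.startswith p.2.2 "LB" && p.2.2 != "SS" && p.2.2 != "FS"),
       s ++ xs.filter (fun p => p.2.2 == "SS"),
       f ++ xs.filter (fun p => p.2.2 == "FS")) := by
  induction xs generalizing d l c s f with
  | nil => simp
  | cons x xs ih =>
    rw [List.foldl_cons]
    have hDL : "DL".toList = ['D', 'L'] := rfl
    have hLB : "LB".toList = ['L', 'B'] := rfl
    have hCB : "CB".toList = ['C', 'B'] := rfl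
    by_cases h1 : PySem.Str.startswith x.2.2 "DL" = true
    · have hD : x.2.2.toList.head? = some 'D' := by
        apply head_of_sw _ ['L']
        rw [← hDL, ← PySem.Str.startswith_eq]; exact h1
      have h2 : PySem.Str.startswith x.2.2 "LB" = false := by
        rw [PySem.Str.startswith_eq, hLB]; exact sw_sw_false _ _ _ hD (by decide) _
      have h4 : (x.2.2 == "SS") = false := sw_ne_lit _ _ hD _ (by decide)
      have h5 : (x.2.2 == "FS") = false := sw_ne_lit _ _ hD _ (by decide)
      have hx : sdbtStep (d, l, c, s, f) x = (d ++ [x], l, c, s, f) := by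
        simp only [sdbtStep]; rw [if_pos h1]
      rw [hx, ih]
      have e4 : ¬ x.2.2 = "SS" := by simpa using h4
      have e5 : ¬ x.2.2 = "FS" := by simpa using h5
      simp only [List.filter_cons, PySem.Str.startswith_eq, hDL, hLB] at *
      simp [h1, h2, e4, e5]
    · have h1' : PySem.Str.startswith x.2.2 "DL" = false := by
        cases h : PySem.Str.startswith x.2.2 "DL" <;> simp_all
      by_cases h2 : PySem.Str.startswith x.2.2 "LB" = true
      · have hL : x.2.2.toList.head? = some 'L' := by
          apply head_of_sw _ ['B']
          rw [← hLB, ← PySem.Str.startswith_eq]; exact h2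
        have h4 : (x.2.2 == "SS") = false := sw_ne_lit _ _ hL _ (by decide)
        have h5 : (x.2.2 == "FS") = false := sw_ne_lit _ _ hL _ (by decide)
        have hx : sdbtStep (d, l, c, s, f) x = (d, l ++ [x], c, s, f) := by
          simp only [sdbtStep]; rw [if_neg (by rw [h1']; exact Bool.false_ne_true), if_pos h2]
        rw [hx, ih]
        have e4 : ¬ x.2.2 = "SS" := by simpa using h4
        have e5 : ¬ x.2.2 = "FS" := by simpa using h5
        simp only [List.filter_cons, PySem.Str.startswith_eq, hDL, hLB] at *
        simp [h1', h2, e4, e5]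
      · have h2' : PySem.Str.startswith x.2.2 "LB" = false := by
          cases h : PySem.Str.startswith x.2.2 "LB" <;> simp_all
        by_cases h3 : ((x.2.2 == "CB1" || x.2.2 == "CB2" || x.2.2 == "NCB") || PySem.Str.startswith x.2.2 "CB") = true
        · have hCN : x.2.2.toList.head? = some 'C' ∨ x.2.2.toList.head? = some 'N' := by
            simp only [Bool.or_eq_true, beq_iff_eq] at h3
            rcases h3 with ((h | h) | h) | h
            · left; rw [h]; rfl
            · left; rw [h]; rfl
            · right; rw [h]; rfl
            · left
              apply head_of_sw _ ['B']
              rw [← hCB, ← PySem.Str.startswith_eq]; exact h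
          have h4 : (x.2.2 == "SS") = false := by
            rcases hCN with h | h
            · exact sw_ne_lit _ _ h _ (by decide)
            · exact sw_ne_lit _ _ h _ (by decide)
          have h5 : (x.2.2 == "FS") = false := by
            rcases hCN with h | h
            · exact sw_ne_lit _ _ h _ (by decide)
            · exact sw_ne_lit _ _ h _ (by decide)
          have hx : sdbtStep (d, l, c, s, f) x = (d, l, c ++ [x], s, f) := by
            simp only [sdbtStep]
            rw [if_neg (by rw [h1']; exact Bool.false_ne_true), if_neg (by rw [h2']; exact Bool.false_ne_true), if_pos h3]
          rw [hx, ih]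
          have e4 : ¬ x.2.2 = "SS" := by simpa using h4
          have e5 : ¬ x.2.2 = "FS" := by simpa using h5
          simp only [List.filter_cons, PySem.Str.startswith_eq, hDL, hLB] at *
          simp [h1', h2', e4, e5]
        · have h3' : ((x.2.2 == "CB1" || x.2.2 == "CB2" || x.2.2 == "NCB") || PySem.Str.startswith x.2.2 "CB") = false := by
            cases h : ((x.2.2 == "CB1" || x.2.2 == "CB2" || x.2.2 == "NCB") || PySem.Str.startswith x.2.2 "CB") <;> simp_all
          by_cases h4 : (x.2.2 == "SS") = true
          · have h5 : (x.2.2 == "FS") = false := by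
              have hss : x.2.2 = "SS" := by simpa using h4
              rw [hss]; decide
            have hx : sdbtStep (d, l, c, s, f) x = (d, l, c, s ++ [x], f) := by
              simp only [sdbtStep]
              rw [if_neg (by rw [h1']; exact Bool.false_ne_true), if_neg (by rw [h2']; exact Bool.false_ne_true), if_neg (by rw [h3']; exact Bool.false_ne_true), if_pos h4]
            rw [hx, ih]
            have e4 : x.2.2 = "SS" := by simpa using h4
            have e5 : ¬ x.2.2 = "FS" := by simpa using h5
            simp only [List.filter_cons, PySem.Str.startswith_eq, hDL, hLB] at *
            simp [h1', h2', e4, e5]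
            decide
          · have h4' : (x.2.2 == "SS") = false := by
              cases h : (x.2.2 == "SS") <;> simp_all
            by_cases h5 : (x.2.2 == "FS") = true
            · have hx : sdbtStep (d, l, c, s, f) x = (d, l, c, s, f ++ [x]) := by
                simp only [sdbtStep]
                rw [if_neg (by rw [h1']; exact Bool.false_ne_true), if_neg (by rw [h2']; exact Bool.false_ne_true), if_neg (by rw [h3']; exact Bool.false_ne_true), if_neg (by rw [h4']; exact Bool.false_ne_true), if_pos h5]
              rw [hx, ih]
              have e4 : ¬ x.2.2 = "SS" := by simpa using h4'
              have e5 : x.2.2 = "FS" := by simpa using h5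
              simp only [List.filter_cons, PySem.Str.startswith_eq, hDL, hLB] at *
              simp [h1', h2', e4, e5]
              decide
            · have h5' : (x.2.2 == "FS") = false := by
                cases h : (x.2.2 == "FS") <;> simp_all
              have hx : sdbtStep (d, l, c, s, f) x = (d, l, c ++ [x], s, f) := by
                simp only [sdbtStep]
                rw [if_neg (by rw [h1']; exact Bool.false_ne_true), if_neg (by rw [h2']; exact Bool.false_ne_true), if_neg (by rw [h3']; exact Bool.false_ne_true), if_neg (by rw [h4']; exact Bool.false_ne_true), if_neg (by rw [h5']; exact Bool.false_ne_true)]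
              rw [hx, ih]
              have e4 : ¬ x.2.2 = "SS" := by simpa using h4'
              have e5 : ¬ x.2.2 = "FS" := by simpa using h5'
              simp only [List.filter_cons, PySem.Str.startswith_eq, hDL, hLB] at *
              simp [h1', h2', e4, e5]

-- ===== VERDICT (by name: the statement is the Claim_ definition above) =====
theorem split_defense_by_type_py_spec : Claim_equal_split_defense_by_type_py := by
  intro positions _
  unfold Spec_split_defense_by_type_py split_defense_by_type_py split_defense_by_type_py_alt
  simpa using main_lemma positions [] [] [] [] []
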